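-- pv_equiv track=rewrite | github.com/vvolhejn/neural_network_smoothness | smooth/util.py | sample_regularly
-- ===== SOURCE A (Python) =====
-- import heapq
--
-- def sample_regularly(n):
--     """
--     Returns a permutation of range(n) whose prefixes are "evenly spaced". Specifically,
--     let x = sample_regularly(n). x[0]=0, x[1]=n-1, and x[i] is chosen from the remaining
--     numbers in range(n) so that it maximizes the distance from the numbers in x[:i].
--
--     >>> list(sample_regularly(10))
--     [0, 9, 4, 6, 2, 7, 1, 3, 5, 8]
--     """
--     assert n >= 2
--     yield 0
--     yield n - 1
--     candidates = []
--     heapq.heappush(candidates, (-(n - 1), (0, n - 1)))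
--     while candidates:
--         _, (fr, to) = heapq.heappop(candidates)
--         mid = (fr + to) // 2
--         if mid == fr or mid == to:
--             continue
--         yield mid
--         heapq.heappush(candidates, (-(mid - fr), (fr, mid)))
--         heapq.heappush(candidates, (-(to - mid), (mid, to)))
-- ===== SOURCE B (Python) =====
-- def sample_regularly(n):
--     """
--     Permutation of range(n) with "evenly spaced" prefixes: instead of popping
--     intervals from a heap one by one, collect all splittable intervals by plain
--     recursion, then emit their midpoints in one sort by (decreasing length,
--     increasing left end) -- the exact order in which the heap would pop them.
--     """
--     assert n >= 2
--     yield 0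
--     yield n - 1
--
--     def intervals(fr, to):
--         mid = (fr + to) // 2
--         if mid == fr or mid == to:
--             return []
--         return [(fr, to)] + intervals(fr, mid) + intervals(mid, to)
--
--     ivs = intervals(0, n - 1)
--     ivs.sort(key=lambda p: (p[0] - p[1], p[0]))
--     for fr, to in ivs:
--         yield (fr + to) // 2
-- ===== Notes on version B (the rewrite author's own statement) =====
-- stated objective: faster
-- what changed: Replaces the heap-driven pop/push loop by plain recursion that collects all splittable intervals, followed by one list.sort on (decreasing length, increasing left end), which is exactly the heap's pop order.
import Mathlib
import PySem

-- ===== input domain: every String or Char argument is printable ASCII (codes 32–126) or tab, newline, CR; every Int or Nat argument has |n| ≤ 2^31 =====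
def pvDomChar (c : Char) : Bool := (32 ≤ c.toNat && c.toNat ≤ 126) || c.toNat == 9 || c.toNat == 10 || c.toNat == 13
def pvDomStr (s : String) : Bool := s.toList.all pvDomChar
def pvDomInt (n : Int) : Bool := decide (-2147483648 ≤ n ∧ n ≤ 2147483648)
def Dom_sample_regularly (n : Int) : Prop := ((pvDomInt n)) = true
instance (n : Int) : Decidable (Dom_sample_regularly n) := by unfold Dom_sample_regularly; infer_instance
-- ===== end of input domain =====

-- B replaces A's heap loop by recursive interval collection plus one sort; equivalence is proved for n ≥ 2 (A asserts n >= 2).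

-- ===== PORT A =====
-- Python tuple comparison (-len, (fr, tto)) < (-len', (fr', tto')) : lexicographic.
def pvKeyLt (a b : Int × (Int × Int)) : Bool :=
  decide (a.1 < b.1 ∨ (a.1 = b.1 ∧ (a.2.1 < b.2.1 ∨ (a.2.1 = b.2.1 ∧ a.2.2 < b.2.2))))

-- heapq.heappop by its contract: returns the smallest item and the rest of the heap
-- (keys are distinct in this algorithm, so which heap layout remains is unobservable).
def pvHeapPop : List (Int × (Int × Int)) → Option ((Int × (Int × Int)) × List (Int × (Int × Int)))
  | [] => none
  | x :: xs =>
    match pvHeapPop xs with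
    | none => some (x, [])
    | some (m, r) => if pvKeyLt m x then some (m, x :: r) else some (x, xs)

-- the while-loop of A; fuel only makes the recursion total (the proof shows (2*n).toNat suffices)
def pvLoopA (fuel : Nat) (h : List (Int × (Int × Int))) : List Int :=
  match fuel with
  | 0 => []
  | f + 1 =>
    match pvHeapPop h with
    | none => []
    | some ((_, (fr, tto)), h') =>
      let mid := PySem.Int.floordiv (fr + tto) 2
      if mid = fr ∨ mid = tto then pvLoopA f h'
      else mid :: pvLoopA f (h' ++ [(-(mid - fr), (fr, mid)), (-(tto - mid), (mid, tto))])

def sample_regularly (n : Int) : List Int :=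
  if n < 2 then []  -- assert fails: outside Pre_
  else 0 :: (n - 1) :: pvLoopA (2 * n).toNat [(-(n - 1), (0, n - 1))]

-- ===== PORT B =====
-- recursive collection of all splittable intervals; fuel (n-1).toNat only makes it total
def pvIntervals (fuel : Nat) (fr tto : Int) : List (Int × Int) :=
  match fuel with
  | 0 => []
  | f + 1 =>
    let mid := PySem.Int.floordiv (fr + tto) 2
    if mid = fr ∨ mid = tto then []
    else (fr, tto) :: (pvIntervals f fr mid ++ pvIntervals f mid tto)

-- Python's tuple sort key (p[0]-p[1], p[0]) : lexicographic, hence Int ×ₗ Int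
def pvKeyB (p : Int × Int) : Int ×ₗ Int := toLex (p.1 - p.2, p.1)

def sample_regularly_alt (n : Int) : List Int :=
  if n < 2 then []  -- assert fails: outside Pre_
  else
    let ivs := PySem.List.sorted (pvIntervals (n - 1).toNat 0 (n - 1)) pvKeyB
    0 :: (n - 1) :: ivs.map (fun p => PySem.Int.floordiv (p.1 + p.2) 2)

-- ===== PRECONDITION & SPEC =====
-- A executes 'assert n >= 2' and raises AssertionError below it; Pre_ is exactly that guard.
def Pre_sample_regularly (n : Int) : Prop := 2 ≤ n
instance (n : Int) : Decidable (Pre_sample_regularly n) := by unfold Pre_sample_regularly; infer_instance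

def pvWitness_sample_regularly : Int := 10

def Spec_sample_regularly (n : Int) (out : List Int) : Prop := out = sample_regularly_alt n
instance (n : Int) (out : List Int) : Decidable (Spec_sample_regularly n out) := by unfold Spec_sample_regularly; infer_instance

-- ===== CLAIM (what is proved, stated in full; the proofs are below) =====
def Claim_equal_sample_regularly : Prop := ∀ (n : Int), Dom_sample_regularly n → Pre_sample_regularly n → Spec_sample_regularly n (sample_regularly n)

-- ===== LEMMAS AND PROOFS =====

-- the strict order "popped earlier": shorter-negated length first, then left end
def pvLtI (p q : Int × Int) : Prop :=
  p.1 - p.2 < q.1 - q.2 ∨ (p.1 - p.2 = q.1 - q.2 ∧ p.1 < q.1)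

lemma pvLtI_asymm {p q : Int × Int} (h : pvLtI p q) : ¬ pvLtI q p := by
  unfold pvLtI at *; omega

lemma pvLtI_trans {p q r : Int × Int} (h1 : pvLtI p q) (h2 : pvLtI q r) : pvLtI p r := by
  unfold pvLtI at *; omega

lemma pvKeyLt_asymm {a b : Int × (Int × Int)} (h : pvKeyLt a b = true) : pvKeyLt b a = false := by
  simp only [pvKeyLt, decide_eq_true_eq, decide_eq_false_iff_not] at *; omega

lemma pvKeyLt_false_trans {a b c : Int × (Int × Int)}
    (h1 : pvKeyLt a b = false) (h2 : pvKeyLt b c = false) : pvKeyLt a c = false := by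
  simp only [pvKeyLt, decide_eq_false_iff_not] at *; omega

lemma pvHeapPop_none {h : List (Int × (Int × Int))} (hp : pvHeapPop h = none) : h = [] := by
  cases h with
  | nil => rfl
  | cons x xs =>
    simp only [pvHeapPop] at hp
    cases hx : pvHeapPop xs <;> simp [hx] at hp
    split at hp <;> simp_all

lemma pvHeapPop_spec {h : List (Int × (Int × Int))} {m r} (hp : pvHeapPop h = some (m, r)) :
    h.Perm (m :: r) ∧ ∀ x ∈ h, pvKeyLt x m = false := by
  induction h generalizing m r with
  | nil => simp [pvHeapPop] at hp
  | cons x xs ih =>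
    simp only [pvHeapPop] at hp
    cases hx : pvHeapPop xs with
    | none =>
      have hxs := pvHeapPop_none hx
      subst hxs
      simp only [hx] at hp
      simp only [Option.some.injEq, Prod.mk.injEq] at hp
      obtain ⟨h1, h2⟩ := hp
      subst h1; subst h2
      refine ⟨List.Perm.refl _, ?_⟩
      intro y hy
      simp only [List.mem_singleton] at hy; subst hy
      simp [pvKeyLt]
    | some mr =>
      obtain ⟨m', r'⟩ := mr
      simp only [hx] at hp
      obtain ⟨hperm', hmin'⟩ := ih hx
      by_cases hlt : pvKeyLt m' x = true
      · rw [if_pos hlt] at hp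
        simp only [Option.some.injEq, Prod.mk.injEq] at hp
        obtain ⟨rfl, rfl⟩ := hp
        refine ⟨List.Perm.trans ((hperm').cons x) (List.Perm.swap m' x r'), ?_⟩
        intro y hy
        rcases List.mem_cons.mp hy with hy | hy
        · subst hy; exact pvKeyLt_asymm hlt
        · exact hmin' y hy
      · rw [if_neg hlt] at hp
        simp only [Option.some.injEq, Prod.mk.injEq] at hp
        obtain ⟨rfl, rfl⟩ := hp
        refine ⟨List.Perm.refl _, ?_⟩
        intro y hy
        rcases List.mem_cons.mp hy with hy | hy
        · subst hy; simp [pvKeyLt]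
        · have hx' : pvKeyLt m' x = false := by simpa using hlt
          exact pvKeyLt_false_trans (hmin' y hy) hx'

-- spec-side closure of one interval (same splitting, well-founded)
def pvC (fr tto : Int) : List (Int × Int) :=
  if h : fr < tto then
    if hm : PySem.Int.floordiv (fr + tto) 2 = fr ∨ PySem.Int.floordiv (fr + tto) 2 = tto then []
    else (fr, tto) ::
      (pvC fr (PySem.Int.floordiv (fr + tto) 2) ++ pvC (PySem.Int.floordiv (fr + tto) 2) tto)
  else []
termination_by (tto - fr).toNat
decreasing_by
  · have := PySem.Int.floordiv_two_mid_bounds (le_of_lt h) (lo := fr) (hi := tto)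
    omega
  · have := PySem.Int.floordiv_two_mid_bounds (le_of_lt h) (lo := fr) (hi := tto)
    omega

lemma pvC_mem (fr tto : Int) : ∀ q ∈ pvC fr tto, fr ≤ q.1 ∧ q.1 < q.2 ∧ q.2 ≤ tto := by
  fun_induction pvC fr tto with
  | case1 fr tto h hm => simp
  | case3 fr tto h => simp
  | case2 fr tto h hm ih1 ih2 =>
    have hb := PySem.Int.floordiv_two_mid_bounds (le_of_lt h) (lo := fr) (hi := tto)
    intro q hq
    rcases List.mem_cons.mp hq with rfl | hq
    · exact ⟨le_refl _, h, le_refl _⟩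
    · rcases List.mem_append.mp hq with h1 | h2
      · obtain ⟨a, b, c⟩ := ih1 q h1
        exact ⟨a, b, by omega⟩
      · obtain ⟨a, b, c⟩ := ih2 q h2
        exact ⟨by omega, b, c⟩

lemma pvC_head_lt (fr tto : Int) : ∀ q ∈ pvC fr tto, q = (fr, tto) ∨ q.2 - q.1 < tto - fr := by
  rw [pvC]
  split
  · next h =>
    split
    · simp
    · next hm =>
      have hb := PySem.Int.floordiv_two_mid_bounds (le_of_lt h) (lo := fr) (hi := tto)
      intro q hq
      rcases List.mem_cons.mp hq with rfl | hq
      · exact Or.inl rfl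
      · right
        rcases List.mem_append.mp hq with h1 | h2
        · obtain ⟨a, b, c⟩ := pvC_mem _ _ q h1; omega
        · obtain ⟨a, b, c⟩ := pvC_mem _ _ q h2; omega
  · simp

lemma pvC_min (fr tto : Int) : ∀ q ∈ pvC fr tto, q = (fr, tto) ∨ pvLtI (fr, tto) q := by
  intro q hq
  rcases pvC_head_lt fr tto q hq with h | h
  · exact Or.inl h
  · exact Or.inr (Or.inl (by omega))

lemma pvC_nodup : ∀ (fr tto : Int), (pvC fr tto).Nodup := by
  intro fr tto
  fun_induction pvC fr tto with
  | case1 fr tto h hm => simp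
  | case3 fr tto h => simp
  | case2 fr tto h hm ih1 ih2 =>
    have hb := PySem.Int.floordiv_two_mid_bounds (le_of_lt h) (lo := fr) (hi := tto)
    refine List.nodup_cons.mpr ⟨?_, List.Nodup.append ih1 ih2 ?_⟩
    · intro hmem
      rcases List.mem_append.mp hmem with h1 | h2
      · obtain ⟨a, b, c⟩ := pvC_mem _ _ _ h1; simp at a b c; omega
      · obtain ⟨a, b, c⟩ := pvC_mem _ _ _ h2; simp at a b c; omega
    · intro q h1 h2
      obtain ⟨a1, b1, c1⟩ := pvC_mem _ _ q h1
      obtain ⟨a2, b2, c2⟩ := pvC_mem _ _ q h2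
      omega

lemma pvIntervals_eq_pvC : ∀ (f : Nat) (fr tto : Int), fr ≤ tto → (tto - fr).toNat ≤ f →
    pvIntervals f fr tto = pvC fr tto := by
  intro f
  induction f with
  | zero =>
    intro fr tto hle hf
    have : tto = fr := by omega
    subst this
    rw [pvC, dif_neg (by omega)]
    rfl
  | succ f ih =>
    intro fr tto hle hf
    simp only [pvIntervals]
    by_cases hm : PySem.Int.floordiv (fr + tto) 2 = fr ∨ PySem.Int.floordiv (fr + tto) 2 = tto
    · rw [if_pos hm, pvC]
      by_cases h : fr < tto
      · rw [dif_pos h, dif_pos hm]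
      · rw [dif_neg h]
    · have hb := PySem.Int.floordiv_two_mid_bounds hle (lo := fr) (hi := tto)
      have h : fr < tto := by omega
      rw [if_neg hm, pvC, dif_pos h, dif_neg hm]
      rw [ih fr _ (by omega) (by omega), ih _ tto (by omega) (by omega)]

-- heap invariant, closure, measure
def pvDisj (p q : Int × Int) : Prop := p.2 ≤ q.1 ∨ q.2 ≤ p.1

def pvInv (h : List (Int × (Int × Int))) : Prop :=
  (∀ k ∈ h, k.1 = -(k.2.2 - k.2.1) ∧ k.2.1 < k.2.2) ∧ (h.map Prod.snd).Pairwise pvDisj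

def pvClosure (h : List (Int × (Int × Int))) : List (Int × Int) :=
  (h.map Prod.snd).flatMap (fun p => pvC p.1 p.2)

def pvMeas (h : List (Int × (Int × Int))) : Nat :=
  (h.map (fun k => (2 * (k.2.2 - k.2.1) - 1).toNat)).sum

lemma pvSortedHead {l : List (Int × Int)} {m : Int × Int} {s : List (Int × Int)}
    (hp : l.Perm (m :: s)) (hpw : l.Pairwise pvLtI) (hmin : ∀ x ∈ s, pvLtI m x) :
    ∃ l', l = m :: l' ∧ l'.Perm s := by
  cases l with
  | nil => have := hp.length_eq; simp at this
  | cons a l' =>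
    have ham : a = m := by
      by_contra hne
      have ha : a ∈ m :: s := hp.mem_iff.mp (List.mem_cons_self)
      have ha' : a ∈ s := by
        rcases List.mem_cons.mp ha with h | h
        · exact absurd h hne
        · exact h
      have hma : pvLtI m a := hmin a ha'
      have hm_l : m ∈ a :: l' := hp.mem_iff.mpr (List.mem_cons_self)
      have hm_l' : m ∈ l' := by
        rcases List.mem_cons.mp hm_l with h | h
        · exact absurd h.symm hne
        · exact h
      exact pvLtI_asymm hma ((List.pairwise_cons.mp hpw).1 m hm_l')
    subst ham
    exact ⟨l', rfl, hp.cons_inv⟩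

lemma pvDisj_symm {p q : Int × Int} (h : pvDisj p q) : pvDisj q p := by
  unfold pvDisj at *; omega

lemma pvClosure_nil_of_meas_zero {h : List (Int × (Int × Int))}
    (hinv : pvInv h) (hmeas : pvMeas h = 0) : h = [] := by
  cases h with
  | nil => rfl
  | cons k t =>
    exfalso
    obtain ⟨_, hv⟩ := hinv.1 k List.mem_cons_self
    have h1 : (2 * (k.2.2 - k.2.1) - 1).toNat ≥ 1 := by omega
    have h2 : pvMeas (k :: t) = (2 * (k.2.2 - k.2.1) - 1).toNat + pvMeas t := by
      unfold pvMeas; simp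
    omega

lemma pvLoopA_eq : ∀ (fuel : Nat) (h : List (Int × (Int × Int))) (l : List (Int × Int)),
    pvInv h → pvMeas h ≤ fuel → l.Perm (pvClosure h) → l.Pairwise pvLtI →
    pvLoopA fuel h = l.map (fun p => PySem.Int.floordiv (p.1 + p.2) 2) := by
  intro fuel
  induction fuel with
  | zero =>
    intro h l hinv hmeas hperm hpw
    have hnil : h = [] := pvClosure_nil_of_meas_zero hinv (by omega)
    subst hnil
    have hl : l = [] := by
      have := hperm.length_eq
      simp [pvClosure] at this
      exact this
    subst hl
    rfl
  | succ f ih =>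
    intro h l hinv hmeas hperm hpw
    cases hpop : pvHeapPop h with
    | none =>
      have hnil := pvHeapPop_none hpop
      subst hnil
      have hl : l = [] := by
        have := hperm.length_eq
        simp [pvClosure] at this
        exact this
      subst hl
      rfl
    | some pr =>
      obtain ⟨⟨k, fr, tto⟩, h'⟩ := pr
      obtain ⟨hperm_h, hmin⟩ := pvHeapPop_spec hpop
      have hmem : (k, (fr, tto)) ∈ h := hperm_h.mem_iff.mpr List.mem_cons_self
      obtain ⟨hkey, hvalid⟩ := hinv.1 _ hmem
      simp only at hkey hvalid
      have hb := PySem.Int.floordiv_two_mid_bounds (le_of_lt hvalid) (lo := fr) (hi := tto)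
      have hmap : (h.map Prod.snd).Perm ((fr, tto) :: h'.map Prod.snd) := by
        simpa using hperm_h.map Prod.snd
      have hpair : ((fr, tto) :: h'.map Prod.snd).Pairwise pvDisj :=
        (List.Perm.pairwise_iff (fun hd => pvDisj_symm hd) hmap).mp hinv.2
      have hinv1' : ∀ x ∈ h', x.1 = -(x.2.2 - x.2.1) ∧ x.2.1 < x.2.2 :=
        fun x hx => hinv.1 x (hperm_h.mem_iff.mpr (List.mem_cons_of_mem _ hx))
      have hmeas_eq : pvMeas h = (2 * (tto - fr) - 1).toNat + pvMeas h' := by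
        have := (hperm_h.map (fun k => (2 * (k.2.2 - k.2.1) - 1).toNat)).sum_eq
        unfold pvMeas
        simpa using this
      have hclos : (pvClosure h).Perm (pvC fr tto ++ pvClosure h') := by
        have h1 := List.Perm.flatMap (f := fun p : Int × Int => pvC p.1 p.2)
          (g := fun p : Int × Int => pvC p.1 p.2) hmap (fun a _ => List.Perm.refl _)
        unfold pvClosure
        simpa using h1
      have hminC : ∀ q ∈ pvClosure h', pvLtI (fr, tto) q := by
        intro q hq
        obtain ⟨p, hpmem, hqp⟩ := List.mem_flatMap.mp hq
        obtain ⟨e, he, rfl⟩ := List.mem_map.mp hpmem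
        obtain ⟨he1, he2⟩ := hinv1' e he
        have hkf : pvKeyLt e (k, (fr, tto)) = false :=
          hmin e (hperm_h.mem_iff.mpr (List.mem_cons_of_mem _ he))
        have hdisj : pvDisj (fr, tto) e.2 :=
          (List.pairwise_cons.mp hpair).1 e.2 (List.mem_map_of_mem he)
        have hlt_root : pvLtI (fr, tto) e.2 := by
          simp only [pvKeyLt, decide_eq_false_iff_not] at hkf
          unfold pvLtI pvDisj at *
          omega
        rcases pvC_min _ _ q hqp with rfl | hq'
        · exact hlt_root
        · exact pvLtI_trans hlt_root hq'
      by_cases hguard : PySem.Int.floordiv (fr + tto) 2 = fr ∨ PySem.Int.floordiv (fr + tto) 2 = tto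
      · have hCnil : pvC fr tto = [] := by rw [pvC, dif_pos hvalid, dif_pos hguard]
        have hstep : pvLoopA (f + 1) h = pvLoopA f h' := by
          simp only [pvLoopA, hpop]
          rw [if_pos hguard]
        rw [hstep]
        exact ih h' l ⟨hinv1', (List.pairwise_cons.mp hpair).2⟩ (by omega)
          (hperm.trans (by simpa [hCnil] using hclos)) hpw
      · have hCcons : pvC fr tto = (fr, tto) ::
            (pvC fr (PySem.Int.floordiv (fr + tto) 2) ++ pvC (PySem.Int.floordiv (fr + tto) 2) tto) := by
          rw [pvC, dif_pos hvalid, dif_neg hguard]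
        have hfm : fr < PySem.Int.floordiv (fr + tto) 2 ∧ PySem.Int.floordiv (fr + tto) 2 < tto := by
          omega
        set mid := PySem.Int.floordiv (fr + tto) 2 with hmiddef
        set h'' := h' ++ [(-(mid - fr), (fr, mid)), (-(tto - mid), (mid, tto))] with hdef
        have hclos'' : pvClosure h'' = pvClosure h' ++ (pvC fr mid ++ pvC mid tto) := by
          unfold pvClosure
          simp [hdef, List.flatMap_append]
        have hperm2 : l.Perm ((fr, tto) :: pvClosure h'') := by
          rw [hclos'']
          refine hperm.trans (hclos.trans ?_)
          rw [hCcons, List.cons_append]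
          exact List.Perm.cons _ List.perm_append_comm
        have hmin'' : ∀ x ∈ pvClosure h'', pvLtI (fr, tto) x := by
          rw [hclos'']
          intro x hx
          rcases List.mem_append.mp hx with hx | hx
          · exact hminC x hx
          · rcases List.mem_append.mp hx with hx | hx
            · obtain ⟨a, b, c⟩ := pvC_mem _ _ x hx
              exact Or.inl (by omega)
            · obtain ⟨a, b, c⟩ := pvC_mem _ _ x hx
              exact Or.inl (by omega)
        obtain ⟨l', rfl, hpl'⟩ := pvSortedHead hperm2 hpw hmin''
        have hinv'' : pvInv h'' := by
          constructor
          · intro x hx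
            rcases List.mem_append.mp hx with hx | hx
            · exact hinv1' x hx
            · rcases List.mem_cons.mp hx with rfl | hx
              · exact ⟨by simp, hfm.1⟩
              · rcases List.mem_cons.mp hx with rfl | hx
                · exact ⟨by simp, hfm.2⟩
                · simp at hx
          · rw [hdef]
            simp only [List.map_append]
            rw [List.pairwise_append]
            refine ⟨(List.pairwise_cons.mp hpair).2, ?_, ?_⟩
            · simp [pvDisj]
            · intro a ha b hb
              have hda : pvDisj (fr, tto) a := (List.pairwise_cons.mp hpair).1 a ha
              simp at hb
              unfold pvDisj at *
              rcases hb with rfl | rfl <;> simp <;> omega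
        have hmeas'' : pvMeas h'' ≤ f := by
          have : pvMeas h'' = pvMeas h' + ((2 * (mid - fr) - 1).toNat + ((2 * (tto - mid) - 1).toNat + 0)) := by
            unfold pvMeas
            rw [hdef]
            simp
          omega
        have hstep : pvLoopA (f + 1) h = mid :: pvLoopA f h'' := by
          simp only [pvLoopA, hpop]
          rw [if_neg hguard]
        rw [hstep, List.map_cons]
        exact congrArg (mid :: ·) (ih h'' l' hinv'' hmeas'' hpl' (List.pairwise_cons.mp hpw).2)

lemma pvKeyB_inj : Function.Injective pvKeyB := by
  intro a b hab
  unfold pvKeyB at hab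
  have h1 : (a.1 - a.2, a.1) = (b.1 - b.2, b.1) := toLex_inj.mp hab
  obtain ⟨h2, h3⟩ := Prod.mk.injEq .. ▸ h1
  · exact Prod.ext (by omega) (by omega)

lemma pvLtI_iff_keyB_lt {a b : Int × Int} : pvLtI a b ↔ pvKeyB a < pvKeyB b := by
  unfold pvLtI pvKeyB
  rw [Prod.Lex.toLex_lt_toLex]

-- ===== VERDICT (by name: the statement is the Claim_ definition above) =====
theorem sample_regularly_spec : Claim_equal_sample_regularly := by
  intro n _ hpre
  have h2 : ¬ n < 2 := not_lt.mpr hpre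
  show sample_regularly n = sample_regularly_alt n
  unfold sample_regularly sample_regularly_alt
  rw [if_neg h2, if_neg h2]
  simp only []
  rw [pvIntervals_eq_pvC _ 0 (n - 1) (by omega) (by omega)]
  have hLperm : (PySem.List.sorted (pvC 0 (n - 1)) pvKeyB).Perm (pvC 0 (n - 1)) :=
    PySem.List.sorted_perm _ _ _
  have hLle := PySem.List.sorted_pairwise (pvC 0 (n - 1)) pvKeyB
  have hLnd : (PySem.List.sorted (pvC 0 (n - 1)) pvKeyB).Nodup :=
    hLperm.nodup_iff.mpr (pvC_nodup 0 (n - 1))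
  have hLpw : (PySem.List.sorted (pvC 0 (n - 1)) pvKeyB).Pairwise pvLtI := by
    refine (hLle.and hLnd).imp ?_
    rintro a b ⟨hle, hne⟩
    exact pvLtI_iff_keyB_lt.mpr (lt_of_le_of_ne hle (fun he => hne (pvKeyB_inj he)))
  have hclos : pvClosure [(-(n - 1), (0, n - 1))] = pvC 0 (n - 1) := by
    unfold pvClosure; simp
  refine congrArg (0 :: (n - 1) :: ·) ?_
  refine pvLoopA_eq _ _ _ ⟨?_, ?_⟩ ?_ ?_ hLpw
  · intro x hx
    simp only [List.mem_singleton] at hx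
    subst hx
    constructor
    · simp
    · simp; omega
  · simp
  · unfold pvMeas; simp; omega
  · rw [hclos]; exact hLperm
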